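-- pv_equiv track=rewrite | github.com/komiamiko/doodads | universal_code/universal_code.py | code_f4_alt_encode
-- ===== SOURCE A (Python) =====
-- def code_f4_alt_encode(n):
--     if n == 0:return '00'
--     if n == 1:return '01'
--     ls = []
--     while n > 1:
--         b = bin(n)[3:]
--         ls.append(b)
--         n = len(b)
--     return '1' + code_f4_alt_encode(len(ls)-1) + ''.join(ls[::-1])
-- ===== SOURCE B (Python) =====
-- def _body(m):
--     # concatenation of the peeled level strings of m, innermost (smallest) first
--     return '' if m <= 1 else _body(m.bit_length() - 1) + bin(m)[3:]
--
-- def _levels(m):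
--     # number of peel steps the inner loop performs on m
--     return 0 if m <= 1 else 1 + _levels(m.bit_length() - 1)
--
-- def code_f4_alt_encode(n):
--     if n == 0: return '00'
--     if n == 1: return '01'
--     suffix = ''
--     t = 0
--     m = n
--     while m > 1:
--         suffix = _body(m) + suffix
--         t += 1
--         m = _levels(m) - 1
--     return '1' * t + ('01' if m == 1 else '00') + suffix
-- ===== Notes on version B (the rewrite author's own statement) =====
-- stated objective: alternative
-- what changed: A's self-recursion with an in-place list of levels is replaced by two small recursions on the bit-length (one producing each round's joined level string directly, one counting the peel steps) driven by a flat loop that prepends each round's string to the suffix and counts the '1' markers.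
import Mathlib
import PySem

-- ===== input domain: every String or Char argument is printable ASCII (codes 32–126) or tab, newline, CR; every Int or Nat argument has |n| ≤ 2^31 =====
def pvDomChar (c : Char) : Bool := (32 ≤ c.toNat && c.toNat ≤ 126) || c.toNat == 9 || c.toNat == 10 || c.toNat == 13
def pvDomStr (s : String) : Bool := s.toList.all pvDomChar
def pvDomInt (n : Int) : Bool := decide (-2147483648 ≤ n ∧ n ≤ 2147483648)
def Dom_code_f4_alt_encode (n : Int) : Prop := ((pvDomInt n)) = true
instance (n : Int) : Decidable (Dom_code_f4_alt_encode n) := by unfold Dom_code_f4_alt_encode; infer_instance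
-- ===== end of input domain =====

-- B replaces A's self-recursion with its mutated level list by two bit-length recursions
-- (each round's joined level string, and the peel-step count) driven by a flat loop that
-- prepends to the suffix (objective: alternative decomposition, same cost).
-- All recursions are written with a structural fuel counter (a totality guard only; the
-- fuel is always sufficient, see the *_unfold lemmas below the claim block).

-- ===== PORT A =====

-- hand port of Python's bin(m) (binary digits, MSB first) for m ≥ 0; exact: bin(m)[2:]
def natBinGo : Nat → Nat → List Char
  | 0, _ => []
  | f + 1, m =>
    if m < 2 then [if m = 1 then '1' else '0']
    else natBinGo f (m / 2) ++ [if m % 2 = 1 then '1' else '0']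

def natBin (m : Nat) : List Char := natBinGo (m + 1) m

-- A's inner 'while n > 1' loop: b = bin(n)[3:]; ls.append(b); n = len(b)
def peelGo : Nat → Nat → List (List Char) → List (List Char)
  | 0, _, ls => ls
  | f + 1, m, ls =>
    if 1 < m then peelGo f ((natBin m).drop 1).length (ls ++ [(natBin m).drop 1]) else ls

def peel (m : Nat) (ls : List (List Char)) : List (List Char) := peelGo m m ls

-- port of A; on n < 0 the Python recurses forever (RecursionError), excluded by Pre_: we return ""
def codeGo : Nat → Int → String
  | 0, _ => ""
  | f + 1, n =>
    if n = 0 then "00"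
    else if n = 1 then "01"
    else if n < 0 then ""
    else
      "1" ++ codeGo f (((peel n.toNat []).length : Int) - 1)
          ++ String.ofList (peel n.toNat []).reverse.flatten

def code_f4_alt_encode (n : Int) : String := codeGo (n.toNat + 1) n

-- ===== PORT B =====

-- hand port of Python's bin(m)[2:] built least-significant-bit first; exact for m ≥ 1:
-- bin(m)[2:] = (bitsLSB m).reverse
def bitsLSBGo : Nat → Nat → List Char
  | 0, _ => []
  | f + 1, m =>
    if m = 0 then [] else (if m % 2 = 1 then '1' else '0') :: bitsLSBGo f (m / 2)

def bitsLSB (m : Nat) : List Char := bitsLSBGo m m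

-- Source B's _body: '' if m <= 1 else _body(m.bit_length() - 1) + bin(m)[3:]
-- (m.bit_length() - 1 ported as Nat.log2 m, exact for m ≥ 1)
def bodyBGo : Nat → Nat → List Char
  | 0, _ => []
  | f + 1, m => if m ≤ 1 then [] else bodyBGo f (Nat.log2 m) ++ (bitsLSB m).reverse.drop 1

def bodyB (m : Nat) : List Char := bodyBGo m m

-- Source B's _levels: 0 if m <= 1 else 1 + _levels(m.bit_length() - 1)
def levelsBGo : Nat → Nat → Nat
  | 0, _ => 0
  | f + 1, m => if m ≤ 1 then 0 else 1 + levelsBGo f (Nat.log2 m)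

def levelsB (m : Nat) : Nat := levelsBGo m m

-- Source B's outer 'while m > 1' loop state: (t, m, suffix)
def bLoopGo : Nat → Int → Nat → List Char → Nat × Int × List Char
  | 0, m, t, suffix => (t, m, suffix)
  | f + 1, m, t, suffix =>
    if 1 < m then bLoopGo f ((levelsB m.toNat : Int) - 1) (t + 1) (bodyB m.toNat ++ suffix)
    else (t, m, suffix)

def bLoop (m : Int) (t : Nat) (suffix : List Char) : Nat × Int × List Char :=
  bLoopGo m.toNat m t suffix

def code_f4_alt_encode_alt (n : Int) : String :=
  if n = 0 then "00"
  else if n = 1 then "01"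
  else
    String.ofList (List.replicate (bLoop n 0 []).1 '1'
      ++ (if (bLoop n 0 []).2.1 = 1 then ['0','1'] else ['0','0'])
      ++ (bLoop n 0 []).2.2)

-- ===== PRECONDITION & SPEC =====
-- Pre_ excludes n < 0, where the Python A recurses without bound and dies with RecursionError
-- (the Python B's loop body never runs there and it returns a value).
def Pre_code_f4_alt_encode (n : Int) : Prop := 0 ≤ n
instance (n : Int) : Decidable (Pre_code_f4_alt_encode n) := by unfold Pre_code_f4_alt_encode; infer_instance
def pvWitness_code_f4_alt_encode : Int := (2)

def Spec_code_f4_alt_encode (n : Int) (out : String) : Prop := out = code_f4_alt_encode_alt n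
instance (n : Int) (out : String) : Decidable (Spec_code_f4_alt_encode n out) := by unfold Spec_code_f4_alt_encode; infer_instance

-- ===== CLAIM (what is proved, stated in full; the proofs are below) =====
def Claim_equal_code_f4_alt_encode : Prop := ∀ (n : Int), Dom_code_f4_alt_encode n → Pre_code_f4_alt_encode n → Spec_code_f4_alt_encode n (code_f4_alt_encode n)

-- ===== LEMMAS AND PROOFS =====

-- fuel irrelevance and one-step unfolding for each fuel recursion

theorem natBinGo_irrel : ∀ (f g m : Nat), m < f → m < g → natBinGo f m = natBinGo g m := by
  intro f
  induction f with
  | zero => intro g m hf; omega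
  | succ f ih =>
    intro g m hf hg
    match g, hg with
    | g + 1, _ =>
      simp only [natBinGo]
      by_cases h : m < 2
      · simp [h]
      · rw [if_neg h, if_neg h, ih g (m / 2) (by omega) (by omega)]

theorem natBin_unfold (m : Nat) :
    natBin m = if m < 2 then [if m = 1 then '1' else '0']
               else natBin (m / 2) ++ [if m % 2 = 1 then '1' else '0'] := by
  by_cases h : m < 2
  · simp [natBin, natBinGo, h]
  · rw [if_neg h]
    show natBinGo (m + 1) m = _
    have e : natBinGo (m + 1) m
        = if m < 2 then [if m = 1 then '1' else '0']
          else natBinGo m (m / 2) ++ [if m % 2 = 1 then '1' else '0'] := rfl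
    rw [e, if_neg h, natBinGo_irrel m (m / 2 + 1) (m / 2) (by omega) (by omega)]
    rfl

theorem natBin_len : ∀ m : Nat, 1 ≤ m → (natBin m).length ≤ m := by
  intro m
  induction m using Nat.strong_induction_on with
  | _ m ih =>
    intro h1
    rw [natBin_unfold]
    split_ifs with h
    · simpa using h1
    all_goals
      have := ih (m / 2) (by omega) (by omega)
      simp only [List.length_append, List.length_cons, List.length_nil]
      omega

theorem peelGo_irrel : ∀ (f g m : Nat) (ls : List (List Char)), m ≤ f → m ≤ g →
    peelGo f m ls = peelGo g m ls := by
  intro f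
  induction f with
  | zero =>
    intro g m ls hf _
    have hm : m = 0 := by omega
    subst hm
    cases g <;> simp [peelGo]
  | succ f ih =>
    intro g m ls hf hg
    match g with
    | 0 =>
      have hm : m = 0 := by omega
      subst hm
      simp [peelGo]
    | g + 1 =>
      simp only [peelGo]
      by_cases h : 1 < m
      · rw [if_pos h, if_pos h]
        have hb : ((natBin m).drop 1).length ≤ m - 1 := by
          have := natBin_len m (by omega)
          simp only [List.length_drop]; omega
        exact ih g ((natBin m).drop 1).length _ (by omega) (by omega)
      · rw [if_neg h, if_neg h]

theorem peel_unfold (m : Nat) (ls : List (List Char)) :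
    peel m ls = if 1 < m then peel ((natBin m).drop 1).length (ls ++ [(natBin m).drop 1]) else ls := by
  by_cases h : 1 < m
  · obtain ⟨k, rfl⟩ : ∃ k, m = k + 1 := ⟨m - 1, by omega⟩
    rw [if_pos h]
    show peelGo (k + 1) (k + 1) ls = _
    simp only [peelGo, if_pos h]
    have hb : ((natBin (k + 1)).drop 1).length ≤ k := by
      have := natBin_len (k + 1) (by omega)
      simp only [List.length_drop]; omega
    exact peelGo_irrel k ((natBin (k + 1)).drop 1).length _ _ hb le_rfl
  · rw [if_neg h]
    have : m = 0 ∨ m = 1 := by omega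
    rcases this with h0 | h1
    · subst h0; rfl
    · subst h1; simp [peel, peelGo]

theorem peel_le : ∀ (m : Nat) (ls : List (List Char)), (peel m ls).length ≤ ls.length + m := by
  intro m
  induction m using Nat.strong_induction_on with
  | _ m ih =>
    intro ls
    rw [peel_unfold]
    split_ifs with h
    · have hb : ((natBin m).drop 1).length ≤ m - 1 := by
        have := natBin_len m (by omega)
        simp only [List.length_drop]; omega
      have := ih ((natBin m).drop 1).length (by omega) (ls ++ [(natBin m).drop 1])
      simp only [List.length_append, List.length_cons, List.length_nil] at this
      omega
    · omega

theorem codeGo_irrel : ∀ (f g : Nat) (n : Int), n.toNat < f → n.toNat < g →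
    codeGo f n = codeGo g n := by
  intro f
  induction f with
  | zero => intro g n hf; omega
  | succ f ih =>
    intro g n hf hg
    match g, hg with
    | g + 1, _ =>
      simp only [codeGo]
      by_cases h0 : n = 0
      · simp [h0]
      by_cases h1 : n = 1
      · simp [h1]
      by_cases h2 : n < 0
      · simp [h0, h1, h2]
      rw [if_neg h0, if_neg h0, if_neg h1, if_neg h1, if_neg h2, if_neg h2]
      have hL := peel_le n.toNat []
      simp only [List.length_nil, Nat.zero_add] at hL
      rw [ih g (((peel n.toNat []).length : Int) - 1) (by omega) (by omega)]

theorem code_unfold (n : Int) :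
    code_f4_alt_encode n =
      if n = 0 then "00"
      else if n = 1 then "01"
      else if n < 0 then ""
      else
        "1" ++ code_f4_alt_encode (((peel n.toNat []).length : Int) - 1)
            ++ String.ofList (peel n.toNat []).reverse.flatten := by
  show codeGo (n.toNat + 1) n = _
  simp only [codeGo]
  by_cases h0 : n = 0
  · simp [h0]
  by_cases h1 : n = 1
  · simp [h1]
  by_cases h2 : n < 0
  · simp [h0, h1, h2]
  rw [if_neg h0, if_neg h0, if_neg h1, if_neg h1, if_neg h2, if_neg h2]
  have hL := peel_le n.toNat []
  simp only [List.length_nil, Nat.zero_add] at hL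
  rw [codeGo_irrel n.toNat ((((peel n.toNat []).length : Int) - 1).toNat + 1)
    (((peel n.toNat []).length : Int) - 1) (by omega) (by omega)]
  rfl

theorem log2_lt_self : ∀ m : Nat, 2 ≤ m → Nat.log2 m < m := by
  intro m
  induction m using Nat.strong_induction_on with
  | _ m ih =>
    intro h2
    rw [Nat.log2_def, if_pos (by omega)]
    by_cases h : m / 2 < 2
    · have h0 : Nat.log2 (m / 2) = 0 := by
        rw [Nat.log2_def, if_neg (by omega)]
      omega
    · have := ih (m / 2) (by omega) (by omega)
      omega

theorem bitsLSBGo_irrel : ∀ (f g m : Nat), m ≤ f → m ≤ g → bitsLSBGo f m = bitsLSBGo g m := by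
  intro f
  induction f with
  | zero =>
    intro g m hf _
    have hm : m = 0 := by omega
    subst hm
    cases g <;> simp [bitsLSBGo]
  | succ f ih =>
    intro g m hf hg
    match g with
    | 0 =>
      have hm : m = 0 := by omega
      subst hm
      simp [bitsLSBGo]
    | g + 1 =>
      simp only [bitsLSBGo]
      by_cases h : m = 0
      · simp [h]
      · rw [if_neg h, if_neg h, ih g (m / 2) (by omega) (by omega)]

theorem bitsLSB_unfold (m : Nat) :
    bitsLSB m = if m = 0 then [] else (if m % 2 = 1 then '1' else '0') :: bitsLSB (m / 2) := by
  by_cases h : m = 0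
  · simp [h, bitsLSB, bitsLSBGo]
  · obtain ⟨k, rfl⟩ : ∃ k, m = k + 1 := ⟨m - 1, by omega⟩
    rw [if_neg h]
    show bitsLSBGo (k + 1) (k + 1) = _
    have e : bitsLSBGo (k + 1) (k + 1)
        = if k + 1 = 0 then [] else (if (k + 1) % 2 = 1 then '1' else '0') :: bitsLSBGo k ((k + 1) / 2) := rfl
    rw [e, if_neg h, bitsLSBGo_irrel k ((k + 1) / 2) ((k + 1) / 2) (by omega) le_rfl]
    rfl

theorem bodyBGo_irrel : ∀ (f g m : Nat), m ≤ f → m ≤ g → bodyBGo f m = bodyBGo g m := by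
  intro f
  induction f with
  | zero =>
    intro g m hf _
    have hm : m = 0 := by omega
    subst hm
    cases g <;> simp [bodyBGo]
  | succ f ih =>
    intro g m hf hg
    match g with
    | 0 =>
      have hm : m = 0 := by omega
      subst hm
      simp [bodyBGo]
    | g + 1 =>
      simp only [bodyBGo]
      by_cases h : m ≤ 1
      · simp [h]
      · have := log2_lt_self m (by omega)
        rw [if_neg h, if_neg h, ih g (Nat.log2 m) (by omega) (by omega)]

theorem bodyB_unfold (m : Nat) :
    bodyB m = if m ≤ 1 then [] else bodyB (Nat.log2 m) ++ (bitsLSB m).reverse.drop 1 := by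
  by_cases h : m ≤ 1
  · rw [if_pos h]
    have : m = 0 ∨ m = 1 := by omega
    rcases this with h0 | h1
    · subst h0; rfl
    · subst h1; simp [bodyB, bodyBGo]
  · obtain ⟨k, rfl⟩ : ∃ k, m = k + 1 := ⟨m - 1, by omega⟩
    rw [if_neg h]
    show bodyBGo (k + 1) (k + 1) = _
    have e : bodyBGo (k + 1) (k + 1)
        = if k + 1 ≤ 1 then [] else bodyBGo k (Nat.log2 (k + 1)) ++ (bitsLSB (k + 1)).reverse.drop 1 := rfl
    have := log2_lt_self (k + 1) (by omega)
    rw [e, if_neg h, bodyBGo_irrel k (Nat.log2 (k + 1)) (Nat.log2 (k + 1)) (by omega) le_rfl]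
    rfl

theorem levelsBGo_irrel : ∀ (f g m : Nat), m ≤ f → m ≤ g → levelsBGo f m = levelsBGo g m := by
  intro f
  induction f with
  | zero =>
    intro g m hf _
    have hm : m = 0 := by omega
    subst hm
    cases g <;> simp [levelsBGo]
  | succ f ih =>
    intro g m hf hg
    match g with
    | 0 =>
      have hm : m = 0 := by omega
      subst hm
      simp [levelsBGo]
    | g + 1 =>
      simp only [levelsBGo]
      by_cases h : m ≤ 1
      · simp [h]
      · have := log2_lt_self m (by omega)
        rw [if_neg h, if_neg h, ih g (Nat.log2 m) (by omega) (by omega)]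

theorem levelsB_unfold (m : Nat) :
    levelsB m = if m ≤ 1 then 0 else 1 + levelsB (Nat.log2 m) := by
  by_cases h : m ≤ 1
  · rw [if_pos h]
    have : m = 0 ∨ m = 1 := by omega
    rcases this with h0 | h1
    · subst h0; rfl
    · subst h1; simp [levelsB, levelsBGo]
  · obtain ⟨k, rfl⟩ : ∃ k, m = k + 1 := ⟨m - 1, by omega⟩
    rw [if_neg h]
    show levelsBGo (k + 1) (k + 1) = _
    have e : levelsBGo (k + 1) (k + 1)
        = if k + 1 ≤ 1 then 0 else 1 + levelsBGo k (Nat.log2 (k + 1)) := rfl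
    have := log2_lt_self (k + 1) (by omega)
    rw [e, if_neg h, levelsBGo_irrel k (Nat.log2 (k + 1)) (Nat.log2 (k + 1)) (by omega) le_rfl]
    rfl

theorem levelsB_le (m : Nat) : levelsB m ≤ m := by
  induction m using Nat.strong_induction_on with
  | _ m ih =>
    rw [levelsB_unfold]
    split_ifs with h
    · omega
    · have hlt : Nat.log2 m < m := log2_lt_self m (by omega)
      have := ih (Nat.log2 m) hlt
      omega

theorem bLoopGo_irrel : ∀ (f g : Nat) (m : Int) (t : Nat) (suf : List Char),
    m.toNat ≤ f → m.toNat ≤ g → bLoopGo f m t suf = bLoopGo g m t suf := by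
  intro f
  induction f with
  | zero =>
    intro g m t suf hf _
    have hm : ¬ 1 < m := by omega
    cases g with
    | zero => rfl
    | succ g => simp [bLoopGo, hm]
  | succ f ih =>
    intro g m t suf hf hg
    match g with
    | 0 =>
      have hm : ¬ 1 < m := by omega
      simp [bLoopGo, hm]
    | g + 1 =>
      simp only [bLoopGo]
      by_cases h : 1 < m
      · rw [if_pos h, if_pos h]
        have hlev := levelsB_le m.toNat
        exact ih g _ _ _ (by omega) (by omega)
      · rw [if_neg h, if_neg h]

theorem bLoop_unfold (m : Int) (t : Nat) (suf : List Char) :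
    bLoop m t suf = if 1 < m then bLoop ((levelsB m.toNat : Int) - 1) (t + 1) (bodyB m.toNat ++ suf)
                    else (t, m, suf) := by
  by_cases h : 1 < m
  · obtain ⟨k, hk⟩ : ∃ k, m.toNat = k + 1 := ⟨m.toNat - 1, by omega⟩
    rw [if_pos h]
    show bLoopGo m.toNat m t suf = _
    rw [hk]
    have e : bLoopGo (k + 1) m t suf
        = if 1 < m then bLoopGo k ((levelsB m.toNat : Int) - 1) (t + 1) (bodyB m.toNat ++ suf)
          else (t, m, suf) := rfl
    have hlev := levelsB_le m.toNat
    rw [e, if_pos h,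
      bLoopGo_irrel k (((levelsB m.toNat : Int) - 1).toNat) ((levelsB m.toNat : Int) - 1) _ _
        (by omega) le_rfl, hk]
    rfl
  · rw [if_neg h]
    show bLoopGo m.toNat m t suf = _
    cases hm : m.toNat with
    | zero => rfl
    | succ k => simp [bLoopGo, h]

-- the bridges between A's helpers and B's

theorem natBin_eq_bitsLSB : ∀ m : Nat, 1 ≤ m → natBin m = (bitsLSB m).reverse := by
  intro m
  induction m using Nat.strong_induction_on with
  | _ m ih =>
    intro h1
    by_cases h : m < 2
    · have : m = 1 := by omega
      subst this
      rw [natBin_unfold, bitsLSB_unfold]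
      simp [bitsLSB, bitsLSBGo]
    · rw [natBin_unfold, if_neg h, bitsLSB_unfold, if_neg (by omega : ¬ m = 0),
        ih (m / 2) (by omega) (by omega)]
      simp

theorem natBin_length_log2 : ∀ m : Nat, 1 ≤ m → (natBin m).length = Nat.log2 m + 1 := by
  intro m
  induction m using Nat.strong_induction_on with
  | _ m ih =>
    intro h1
    by_cases h : m < 2
    · have : m = 1 := by omega
      subst this
      rw [natBin_unfold, Nat.log2_def]
      simp
    · rw [natBin_unfold, if_neg h, Nat.log2_def, if_pos (by omega : m ≥ 2)]
      simp only [List.length_append, List.length_cons, List.length_nil]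
      rw [ih (m / 2) (by omega) (by omega)]

-- the bridge between A's peel loop and B's bodyB/levelsB recursions
theorem peel_body_levels : ∀ m : Nat, ∀ ls : List (List Char),
    (peel m ls).reverse.flatten = bodyB m ++ ls.reverse.flatten ∧
    (peel m ls).length = ls.length + levelsB m := by
  intro m
  induction m using Nat.strong_induction_on with
  | _ m ih =>
    intro ls
    by_cases h : 1 < m
    · rw [peel_unfold, if_pos h, bodyB_unfold, if_neg (by omega : ¬ m ≤ 1), levelsB_unfold,
        if_neg (by omega : ¬ m ≤ 1)]
      have harg : ((natBin m).drop 1).length = Nat.log2 m := by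
        simp only [List.length_drop]
        rw [natBin_length_log2 m (by omega)]
        omega
      have hlt : Nat.log2 m < m := log2_lt_self m (by omega)
      have := ih ((natBin m).drop 1).length (by omega) (ls ++ [(natBin m).drop 1])
      rw [harg] at this ⊢
      rcases this with ⟨hfl, hln⟩
      constructor
      · rw [hfl]
        rw [natBin_eq_bitsLSB m (by omega)]
        simp [List.append_assoc]
      · simp only [List.length_append, List.length_cons, List.length_nil] at hln
        omega
    · rw [peel_unfold, if_neg h, bodyB_unfold, if_pos (by omega : m ≤ 1), levelsB_unfold,
        if_pos (by omega : m ≤ 1)]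
      simp

-- the loop invariant: assembling bLoop's final state yields A's recursion unrolled
theorem bLoop_asm : ∀ (k : Nat) (m : Int), m.toNat ≤ k → 0 ≤ m → ∀ (t : Nat) (suf : List Char),
    List.replicate (bLoop m t suf).1 '1'
      ++ (if (bLoop m t suf).2.1 = 1 then ['0','1'] else ['0','0'])
      ++ (bLoop m t suf).2.2
    = List.replicate t '1' ++ (code_f4_alt_encode m).toList ++ suf := by
  intro k
  induction k with
  | zero =>
    intro m hk hm t suf
    have hm0 : m = 0 := by omega
    subst hm0
    rw [bLoop_unfold, if_neg (by omega : ¬ (1:Int) < 0)]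
    rw [code_unfold]
    simp
  | succ k ih =>
    intro m hk hm t suf
    rw [bLoop_unfold]
    by_cases h : 1 < m
    · rw [if_pos h]
      have hpl := peel_body_levels m.toNat []
      simp only [List.length_nil, List.reverse_nil, List.flatten_nil, List.append_nil,
        Nat.zero_add] at hpl
      have hlev := levelsB_le m.toNat
      have ih' := ih (((levelsB m.toNat : Int)) - 1) (by omega) (by
        rw [levelsB_unfold]
        rw [if_neg (by omega : ¬ m.toNat ≤ 1)]
        omega) (t + 1) (bodyB m.toNat ++ suf)
      rw [ih']
      conv_rhs => rw [code_unfold]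
      rw [if_neg (by omega : ¬ m = 0), if_neg (by omega : ¬ m = 1),
        if_neg (by omega : ¬ m < 0)]
      rw [hpl.1, hpl.2]
      simp [List.replicate_succ', List.append_assoc]
    · rw [if_neg h]
      have : m = 0 ∨ m = 1 := by omega
      rcases this with h0 | h1
      · subst h0
        rw [code_unfold]
        simp
      · subst h1
        rw [code_unfold]
        simp

theorem toList_inj (s t : String) (h : s.toList = t.toList) : s = t := by
  have h1 : s = String.ofList s.toList := by simp
  have h2 : t = String.ofList t.toList := by simp
  rw [h1, h2, h]

-- ===== VERDICT (by name: the statement is the Claim_ definition above) =====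
theorem code_f4_alt_encode_spec : Claim_equal_code_f4_alt_encode := by
  intro n _ hpre
  unfold Spec_code_f4_alt_encode
  unfold Pre_code_f4_alt_encode at hpre
  by_cases h0 : n = 0
  · subst h0
    rw [code_unfold, code_f4_alt_encode_alt]
    simp
  by_cases h1 : n = 1
  · subst h1
    rw [code_unfold, code_f4_alt_encode_alt]
    simp
  rw [code_f4_alt_encode_alt, if_neg h0, if_neg h1]
  have h := bLoop_asm n.toNat n le_rfl hpre 0 []
  simp only [List.replicate_zero, List.nil_append, List.append_nil] at h
  apply toList_inj
  rw [h]
  simp
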